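-- pv_equiv track=rewrite | github.com/yangence/circfull | script/circfull/annoFL.py | compareExon2gene
-- ===== SOURCE A (Python) =====
-- def locatePos(geneExon,pos):
--     ref_start=[i[0]+1 for i in geneExon]
--     ref_end=[i[1] for i in geneExon]
--     ref_num=len(ref_start)
--     judgeBody='intron'
--     for i in range(ref_num):
--         if (ref_start[i]<pos) and (ref_end[i]>pos):
--             judgeBody='inE'
--     return(judgeBody)
--
-- def judgeIntron(geneExon,s,e):
--     ref_start=[i[0]+1 for i in geneExon]
--     ref_end=[i[1] for i in geneExon]
--     ref_num=len(ref_start)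
--     for i in range(ref_num):
--         if s<ref_start[i] and e>ref_end[i]:
--             return(True)
--     return(False)
--
-- def compareExon2gene(geneExon,exon_start,exon_end):
--     ref_start=[i[0]+1 for i in geneExon]
--     ref_end=[i[1] for i in geneExon]
--     num=len(exon_start)
--     start_match=[i in ref_start for i in exon_start]
--     end_match=[i in ref_end for i in exon_end]
--     in_start_match=0
--     in_end_match=0
--     for i in range(num):
--         for j in range(len(ref_start)):
--             if (exon_start[i]>=ref_start[j]) & (exon_start[i]<=ref_end[j]):
--                 in_start_match+=1
--             if (exon_end[i]>=ref_start[j]) & (exon_end[i]<=ref_end[j]):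
--                  in_end_match+=1
--
--     start_pos=[]
--     end_pos=[]
--     for i in range(num):
--         if start_match[i]:
--             start_pos.append('m')
--         else:
--             start_pos.append(locatePos(geneExon,exon_start[i]))
--         if end_match[i]:
--             end_pos.append('m')
--         else:
--             end_pos.append(locatePos(geneExon,exon_end[i]))
--         if start_pos[-1]=='intron':
--             if end_pos[-1] !='intron':
--                 start_pos[-1]='outE'
--             else:
--                 if judgeIntron(geneExon,exon_start[i],exon_end[i]):
--                     start_pos[-1]='outE'
--                     end_pos[-1]='outE'
--         if end_pos[-1]=='intron':
--             if start_pos[-1] !='intron':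
--                 end_pos[-1]='outE'
--     match_score=sum(start_match)+sum(end_match)
--     start_pos_all=','.join(start_pos)
--     end_pos_all=','.join(end_pos)
--     return(start_pos_all,end_pos_all,match_score,in_start_match+in_end_match)
-- ===== SOURCE B (Python) =====
-- def _bisect_left(a, x):
--     lo, hi = 0, len(a)
--     while lo < hi:
--         mid = (lo + hi) // 2
--         if a[mid] < x:
--             lo = mid + 1
--         else:
--             hi = mid
--     return lo
--
-- def _bisect_right(a, x):
--     lo, hi = 0, len(a)
--     while lo < hi:
--         mid = (lo + hi) // 2
--         if x < a[mid]:
--             hi = mid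
--         else:
--             lo = mid + 1
--     return lo
--
-- def compareExon2gene(geneExon, exon_start, exon_end):
--     start_set = set(s + 1 for s, e in geneExon)
--     end_set = set(e for s, e in geneExon)
--     # non-empty closed reference exons [s+1, e], start/end coordinates sorted
--     cs = sorted(s + 1 for s, e in geneExon if s + 1 <= e)
--     ce = sorted(e for s, e in geneExon if s + 1 <= e)
--     # reference exons whose open interior (s+1, e) can contain a point
--     os_ = sorted(s + 1 for s, e in geneExon if s + 2 <= e)
--     oe = sorted(e for s, e in geneExon if s + 2 <= e)
--
--     def contain(p):  # how many reference exons contain p  (#start<=p - #end<p)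
--         return _bisect_right(cs, p) - _bisect_left(ce, p)
--
--     def interior(p):  # is p strictly inside some reference exon?
--         return _bisect_left(os_, p) - _bisect_right(oe, p) > 0
--
--     pairs = list(zip(exon_start, exon_end))
--     in_match = sum(contain(s) + contain(e) for s, e in pairs)
--     match_score = sum(p in start_set for p in exon_start) + sum(p in end_set for p in exon_end)
--
--     start_pos = []
--     end_pos = []
--     for s0, e0 in pairs:
--         sp = 'm' if s0 in start_set else ('inE' if interior(s0) else 'intron')
--         ep = 'm' if e0 in end_set else ('inE' if interior(e0) else 'intron')
--         if sp == 'intron':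
--             if ep != 'intron':
--                 sp = 'outE'
--             elif any(s0 < s + 1 and e0 > e for s, e in geneExon):
--                 sp = 'outE'
--                 ep = 'outE'
--         elif ep == 'intron':
--             ep = 'outE'
--         start_pos.append(sp)
--         end_pos.append(ep)
--     return ','.join(start_pos), ','.join(end_pos), match_score, in_match
-- ===== Notes on version B (the rewrite author's own statement) =====
-- stated objective: faster
-- what changed: Replaces A's per-exon linear scans of the reference exon list (list-membership tests, locatePos full scans and the nested counting loop) by hash sets for exact boundary matches plus sorted coordinate arrays queried with binary-search stabbing counts (#starts<=p minus #ends<p); only the rare both-intron repair keeps a linear any().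
import Mathlib
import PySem

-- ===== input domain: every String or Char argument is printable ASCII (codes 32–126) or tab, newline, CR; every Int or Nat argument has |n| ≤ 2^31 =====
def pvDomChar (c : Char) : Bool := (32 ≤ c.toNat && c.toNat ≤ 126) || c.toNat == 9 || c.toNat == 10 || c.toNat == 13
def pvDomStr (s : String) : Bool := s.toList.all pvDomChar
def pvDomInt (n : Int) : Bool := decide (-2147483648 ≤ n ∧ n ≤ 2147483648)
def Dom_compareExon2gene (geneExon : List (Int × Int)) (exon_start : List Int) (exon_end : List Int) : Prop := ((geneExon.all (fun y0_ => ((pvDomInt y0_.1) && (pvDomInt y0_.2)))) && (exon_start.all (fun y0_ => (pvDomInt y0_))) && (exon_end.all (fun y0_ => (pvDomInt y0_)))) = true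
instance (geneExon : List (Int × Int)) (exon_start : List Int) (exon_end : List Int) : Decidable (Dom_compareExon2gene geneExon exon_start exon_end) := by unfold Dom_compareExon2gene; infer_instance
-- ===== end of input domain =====

-- B replaces A's per-exon linear scans of the reference list by sets plus sorted
-- coordinate arrays queried with binary-search stabbing counts (objective: faster).

-- ===== PORT A =====
def locatePosA (geneExon : List (Int × Int)) (pos : Int) : String :=
  let ref_start := geneExon.map (fun i => i.1 + 1)
  let ref_end := geneExon.map (fun i => i.2)
  let ref_num := PySem.List.len ref_start
  (PySem.List.pyRange 0 ref_num 1).foldl (fun judgeBody i =>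
    if PySem.List.pyGetD ref_start i 0 < pos ∧ PySem.List.pyGetD ref_end i 0 > pos then "inE"
    else judgeBody) "intron"

-- the Python loop returns True on the first hit: ported as .any over the index range
def judgeIntronA (geneExon : List (Int × Int)) (s e : Int) : Bool :=
  let ref_start := geneExon.map (fun i => i.1 + 1)
  let ref_end := geneExon.map (fun i => i.2)
  let ref_num := PySem.List.len ref_start
  (PySem.List.pyRange 0 ref_num 1).any (fun i =>
    decide (s < PySem.List.pyGetD ref_start i 0 ∧ e > PySem.List.pyGetD ref_end i 0))

-- body of the nested counting loop (j is the inner index, i the outer one)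
def countStepA (ref_start ref_end exon_start exon_end : List Int) (i : Int) (acc : Int × Int) (j : Int) : Int × Int :=
  let acc := if PySem.List.pyGetD exon_start i 0 ≥ PySem.List.pyGetD ref_start j 0 ∧
                PySem.List.pyGetD exon_start i 0 ≤ PySem.List.pyGetD ref_end j 0
             then (acc.1 + 1, acc.2) else acc
  if PySem.List.pyGetD exon_end i 0 ≥ PySem.List.pyGetD ref_start j 0 ∧
     PySem.List.pyGetD exon_end i 0 ≤ PySem.List.pyGetD ref_end j 0
  then (acc.1, acc.2 + 1) else acc

-- body of the label-building loop: append to both lists, then patch their last entries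
def posStepA (geneExon : List (Int × Int)) (start_match end_match : List Bool)
    (exon_start exon_end : List Int) (st : List String × List String) (i : Int) :
    List String × List String :=
  let start_pos := st.1 ++ [if PySem.List.pyGetD start_match i false then "m"
                            else locatePosA geneExon (PySem.List.pyGetD exon_start i 0)]
  let end_pos := st.2 ++ [if PySem.List.pyGetD end_match i false then "m"
                          else locatePosA geneExon (PySem.List.pyGetD exon_end i 0)]
  let st2 : List String × List String :=
    if PySem.List.pyGetD start_pos (-1) "" = "intron" then
      (if PySem.List.pyGetD end_pos (-1) "" ≠ "intron" then
         (PySem.List.pySetD start_pos (-1) "outE", end_pos)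
       else if judgeIntronA geneExon (PySem.List.pyGetD exon_start i 0) (PySem.List.pyGetD exon_end i 0) then
         (PySem.List.pySetD start_pos (-1) "outE", PySem.List.pySetD end_pos (-1) "outE")
       else (start_pos, end_pos))
    else (start_pos, end_pos)
  let end_pos2 :=
    if PySem.List.pyGetD st2.2 (-1) "" = "intron" then
      (if PySem.List.pyGetD st2.1 (-1) "" ≠ "intron" then PySem.List.pySetD st2.2 (-1) "outE"
       else st2.2)
    else st2.2
  (st2.1, end_pos2)

def compareExon2gene (geneExon : List (Int × Int)) (exon_start : List Int) (exon_end : List Int) : String × String × Int × Int :=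
  let ref_start := geneExon.map (fun i => i.1 + 1)
  let ref_end := geneExon.map (fun i => i.2)
  let num := PySem.List.len exon_start
  let start_match := exon_start.map (fun i => decide (i ∈ ref_start))
  let end_match := exon_end.map (fun i => decide (i ∈ ref_end))
  let counts := (PySem.List.pyRange 0 num 1).foldl (fun (acc : Int × Int) i =>
      (PySem.List.pyRange 0 (PySem.List.len ref_start) 1).foldl
        (countStepA ref_start ref_end exon_start exon_end i) acc) ((0 : Int), (0 : Int))
  let pos := (PySem.List.pyRange 0 num 1).foldl
      (posStepA geneExon start_match end_match exon_start exon_end)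
      (([] : List String), ([] : List String))
  let match_score := (start_match.map (fun b => if b then (1 : Int) else 0)).sum
                   + (end_match.map (fun b => if b then (1 : Int) else 0)).sum
  (PySem.Str.join "," pos.1, PySem.Str.join "," pos.2, match_score, counts.1 + counts.2)

-- ===== PORT B =====
-- Source B's hand-written _bisect_right/_bisect_left are CPython's bisect loops: ported
-- as the prelude's PySem.List.bisectRight / bisectLeft (same lo/hi halving loop).
def bContain (cs ce : List Int) (p : Int) : Int :=
  (PySem.List.bisectRight cs p : Int) - (PySem.List.bisectLeft ce p : Int)

def bInterior (os oe : List Int) (p : Int) : Bool :=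
  decide ((PySem.List.bisectLeft os p : Int) - (PySem.List.bisectRight oe p : Int) > 0)

-- per-exon label pair of B's loop body
def labelB (geneExon : List (Int × Int)) (start_set end_set : PySem.Set Int)
    (os oe : List Int) (q : Int × Int) : String × String :=
  let sp := if PySem.Set.contains start_set q.1 then "m"
            else if bInterior os oe q.1 then "inE" else "intron"
  let ep := if PySem.Set.contains end_set q.2 then "m"
            else if bInterior os oe q.2 then "inE" else "intron"
  if sp = "intron" then
    (if ep ≠ "intron" then ("outE", ep)
     else if geneExon.any (fun r => decide (q.1 < r.1 + 1 ∧ q.2 > r.2)) then ("outE", "outE")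
     else (sp, ep))
  else if ep = "intron" then (sp, "outE") else (sp, ep)

def compareExon2gene_alt (geneExon : List (Int × Int)) (exon_start : List Int) (exon_end : List Int) : String × String × Int × Int :=
  let start_set : PySem.Set Int := PySem.Set.ofList (geneExon.map (fun r => r.1 + 1))
  let end_set : PySem.Set Int := PySem.Set.ofList (geneExon.map (fun r => r.2))
  let cs := PySem.List.sorted ((geneExon.filter (fun r => r.1 + 1 ≤ r.2)).map (fun r => r.1 + 1)) (fun x => x) false
  let ce := PySem.List.sorted ((geneExon.filter (fun r => r.1 + 1 ≤ r.2)).map (fun r => r.2)) (fun x => x) false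
  let os := PySem.List.sorted ((geneExon.filter (fun r => r.1 + 2 ≤ r.2)).map (fun r => r.1 + 1)) (fun x => x) false
  let oe := PySem.List.sorted ((geneExon.filter (fun r => r.1 + 2 ≤ r.2)).map (fun r => r.2)) (fun x => x) false
  let pairs := exon_start.zip exon_end
  let in_match := (pairs.map (fun q => bContain cs ce q.1 + bContain cs ce q.2)).sum
  let match_score := (exon_start.map (fun p => if PySem.Set.contains start_set p then (1 : Int) else 0)).sum
                   + (exon_end.map (fun p => if PySem.Set.contains end_set p then (1 : Int) else 0)).sum
  let labels := pairs.map (labelB geneExon start_set end_set os oe)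
  (PySem.Str.join "," (labels.map Prod.fst), PySem.Str.join "," (labels.map Prod.snd), match_score, in_match)

-- ===== PRECONDITION & SPEC =====
-- Pre_ excludes exactly the inputs where A raises IndexError: the counting and label
-- loops index exon_end[i] for every i < len(exon_start).
def Pre_compareExon2gene (geneExon : List (Int × Int)) (exon_start : List Int) (exon_end : List Int) : Prop :=
  exon_start.length ≤ exon_end.length
instance (geneExon : List (Int × Int)) (exon_start : List Int) (exon_end : List Int) : Decidable (Pre_compareExon2gene geneExon exon_start exon_end) := by unfold Pre_compareExon2gene; infer_instance
def pvWitness_compareExon2gene : (List (Int × Int)) × List Int × List Int := ([(1, 5), (8, 9)], [2, 6], [4, 7])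
def Spec_compareExon2gene (geneExon : List (Int × Int)) (exon_start : List Int) (exon_end : List Int) (out : String × String × Int × Int) : Prop := out = compareExon2gene_alt geneExon exon_start exon_end
instance (geneExon : List (Int × Int)) (exon_start : List Int) (exon_end : List Int) (out : String × String × Int × Int) : Decidable (Spec_compareExon2gene geneExon exon_start exon_end out) := by unfold Spec_compareExon2gene; infer_instance

-- ===== CLAIM (what is proved, stated in full; the proofs are below) =====
def Claim_equal_compareExon2gene : Prop := ∀ (geneExon : List (Int × Int)) (exon_start : List Int) (exon_end : List Int), Dom_compareExon2gene geneExon exon_start exon_end → Pre_compareExon2gene geneExon exon_start exon_end → Spec_compareExon2gene geneExon exon_start exon_end (compareExon2gene geneExon exon_start exon_end)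

-- ===== LEMMAS AND PROOFS =====

theorem countP_threshold (p : Int → Bool) : ∀ (xs : List Int) (k : Nat), k ≤ xs.length →
    (∀ (j : Nat) (hj : j < xs.length), j < k → p xs[j] = true) →
    (∀ (j : Nat) (hj : j < xs.length), k ≤ j → p xs[j] = false) →
    xs.countP p = k := by
  intro xs
  induction xs with
  | nil => intro k hk _ _; simp at hk ⊢; omega
  | cons x t ih =>
    intro k hk h1 h2
    cases k with
    | zero =>
      have hx : p x = false := h2 0 (by simp) (by omega)
      have ht : t.countP p = 0 :=
        ih 0 (by omega) (fun j hj hjk => by omega)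
          (fun j hj _ => h2 (j+1) (by simp; omega) (by omega))
      rw [List.countP_cons, hx, ht]; simp
    | succ k' =>
      have hx : p x = true := h1 0 (by simp) (by omega)
      have ht : t.countP p = k' :=
        ih k' (by simp at hk; omega)
          (fun j hj hjk => h1 (j+1) (by simp; omega) (by omega))
          (fun j hj hjk => h2 (j+1) (by simp; omega) (by omega))
      rw [List.countP_cons, hx, ht]; simp

theorem bisectRight_countP (xs : List Int) (x : Int) (h : xs.Pairwise (· ≤ ·)) :
    PySem.List.bisectRight xs x = xs.countP (fun y => decide (y ≤ x)) := by
  obtain ⟨hk, h1, h2⟩ := PySem.List.bisectRight_spec xs x h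
  exact (countP_threshold (fun y => decide (y ≤ x)) xs _ hk
    (fun j hj hjk => by simpa using h1 j hj hjk)
    (fun j hj hjk => by simpa using not_le.mpr (h2 j hj hjk))).symm

theorem bisectLeft_countP (xs : List Int) (x : Int) (h : xs.Pairwise (· ≤ ·)) :
    PySem.List.bisectLeft xs x = xs.countP (fun y => decide (y < x)) := by
  obtain ⟨hk, h1, h2⟩ := PySem.List.bisectLeft_spec xs x h
  exact (countP_threshold (fun y => decide (y < x)) xs _ hk
    (fun j hj hjk => by simpa using h1 j hj hjk)
    (fun j hj hjk => by simpa using not_lt.mpr (h2 j hj hjk))).symm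

theorem countP_sortedMapFilter (q : Int → Bool) (f : (Int × Int) → Int) (w : (Int × Int) → Bool) (ge : List (Int × Int)) :
    (PySem.List.sorted ((ge.filter w).map f) (fun x => x) false).countP q
      = ge.countP (fun r => q (f r) && w r) := by
  rw [(PySem.List.sorted_perm _ _ _).countP_eq, List.countP_map, List.countP_filter]
  rfl

theorem countP_diff_closed (p : Int) : ∀ (ge : List (Int × Int)),
    (↑(ge.countP (fun r => decide (r.1 + 1 ≤ p) && decide (r.1 + 1 ≤ r.2))) : Int)
      - ↑(ge.countP (fun r => decide (r.2 < p) && decide (r.1 + 1 ≤ r.2)))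
      = ↑(ge.countP (fun r => decide (r.1 + 1 ≤ p ∧ p ≤ r.2))) := by
  intro ge
  induction ge with
  | nil => simp
  | cons r t ih =>
    simp only [List.countP_cons]
    push_cast
    split_ifs with hA hB hC hB hC hC <;>
      simp only [Bool.and_eq_true, decide_eq_true_eq] at * <;> omega

theorem countP_diff_open (p : Int) : ∀ (ge : List (Int × Int)),
    (↑(ge.countP (fun r => decide (r.1 + 1 < p) && decide (r.1 + 2 ≤ r.2))) : Int)
      - ↑(ge.countP (fun r => decide (r.2 ≤ p) && decide (r.1 + 2 ≤ r.2)))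
      = ↑(ge.countP (fun r => decide (r.1 + 1 < p ∧ p < r.2))) := by
  intro ge
  induction ge with
  | nil => simp
  | cons r t ih =>
    simp only [List.countP_cons]
    push_cast
    split_ifs with hA hB hC hB hC hC <;>
      simp only [Bool.and_eq_true, decide_eq_true_eq] at * <;> omega

theorem pyRange_cast (n : Nat) : PySem.List.pyRange 0 (n : Int) 1 = (List.range n).map (fun k : Nat => (k : Int)) := by
  rw [PySem.List.pyRange_one]
  simp only [Int.sub_zero, Int.toNat_natCast, zero_add]

theorem pyGetD_map_inrange {β : Type} (ge : List (Int × Int)) (f : (Int × Int) → β) (i : Int)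
    (h0 : 0 ≤ i) (h : i < (ge.length : Int)) (d : β) (d' : Int × Int) :
    PySem.List.pyGetD (ge.map f) i d = f (PySem.List.pyGetD ge i d') := by
  rw [PySem.List.pyGetD_eq_getElem _ _ h0 (by simpa using h),
      PySem.List.pyGetD_eq_getElem _ _ h0 (by simpa using h)]
  simp [List.getElem_map]

theorem foldl_if_const (K : String) (c : (Int × Int) → Prop) [DecidablePred c] :
    ∀ (l : List (Int × Int)) (init : String),
      l.foldl (fun acc x => if c x then K else acc) init
        = if l.any (fun x => decide (c x)) then K else init := by
  intro l
  induction l with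
  | nil => simp
  | cons x t ih =>
    intro init
    by_cases h : c x
    · simp [h, ih]
    · simp only [List.foldl_cons, ih, List.any_cons, h, decide_false, Bool.false_or, if_false]

theorem contains_ofList_eq (l : List Int) (x : Int) :
    PySem.Set.contains (PySem.Set.ofList l) x = decide (x ∈ l) := by
  by_cases h : x ∈ l
  · simp only [h, decide_true]
    exact (PySem.Set.contains_iff _ _).mpr ((PySem.Set.mem_ofList _ _).mpr h)
  · simp only [h, decide_false]
    rw [← Bool.not_eq_true]
    intro hc
    exact h ((PySem.Set.mem_ofList _ _).mp ((PySem.Set.contains_iff _ _).mp hc))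

theorem zip_map_getD {γ : Type} (g : Int × Int → γ) :
    ∀ (xs ys : List Int), xs.length ≤ ys.length →
      (xs.zip ys).map g
        = (List.range xs.length).map (fun k => g (xs.getD k 0, ys.getD k 0)) := by
  intro xs
  induction xs with
  | nil => simp
  | cons x t ih =>
    intro ys h
    cases ys with
    | nil => simp at h
    | cons y u =>
      simp only [List.zip_cons_cons, List.map_cons, List.length_cons,
        List.range_succ_eq_map, List.map_map]
      simp only [List.getD_cons_zero, List.getD_cons_succ, Function.comp_def]
      exact congrArg _ (ih u (by simpa using h))

theorem pySetD_append_neg_one (l : List String) (x v : String) :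
    PySem.List.pySetD (l ++ [x]) (-1) v = l ++ [v] := by
  simp [PySem.List.pySetD, PySem.List.pySet?, PySem.List.pyIdx?]

theorem any_pyRange_getD (xs : List (Int × Int)) (d : Int × Int) (q : (Int × Int) → Bool) :
    (PySem.List.pyRange 0 (xs.length : Int) 1).any (fun i => q (PySem.List.pyGetD xs i d))
      = xs.any q := by
  rw [pyRange_cast, List.any_map]
  rw [Bool.eq_iff_iff]
  simp only [List.any_eq_true, List.mem_range, Function.comp_def, PySem.List.pyGetD_natCast]
  constructor
  · rintro ⟨k, hk, hq⟩
    exact ⟨xs.getD k d, by rw [List.getD_eq_getElem _ _ hk]; exact xs.getElem_mem hk, hq⟩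
  · rintro ⟨x, hx, hq⟩
    obtain ⟨k, hk, rfl⟩ := List.mem_iff_getElem.mp hx
    exact ⟨k, hk, by rw [List.getD_eq_getElem _ _ hk]; exact hq⟩

theorem locatePos_eq (ge : List (Int × Int)) (p : Int) :
    locatePosA ge p
      = if ge.any (fun r => decide (r.1 + 1 < p ∧ p < r.2)) then "inE" else "intron" := by
  unfold locatePosA
  simp only [PySem.List.len_eq, List.length_map, gt_iff_lt]
  rw [PySem.List.foldl_congr_mem _ _
      (fun jb i => if (PySem.List.pyGetD ge i (0, 0)).1 + 1 < p ∧ p < (PySem.List.pyGetD ge i (0, 0)).2 then "inE" else jb) _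
      (by
        intro acc i hi
        obtain ⟨h0, h1⟩ := PySem.List.mem_pyRange_one.mp hi
        rw [pyGetD_map_inrange ge _ i h0 h1 0 (0, 0), pyGetD_map_inrange ge _ i h0 h1 0 (0, 0)])]
  rw [PySem.List.foldl_pyRange_zero_pyGetD' ge (0, 0)
      (fun jb r => if r.1 + 1 < p ∧ p < r.2 then "inE" else jb) "intron"]
  exact foldl_if_const "inE" _ ge "intron"

theorem judgeIntron_eq (ge : List (Int × Int)) (s e : Int) :
    judgeIntronA ge s e = ge.any (fun r => decide (s < r.1 + 1 ∧ r.2 < e)) := by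
  unfold judgeIntronA
  simp only [PySem.List.len_eq, List.length_map, gt_iff_lt]
  rw [PySem.List.any_congr_mem
      (g := fun i => decide (s < (PySem.List.pyGetD ge i ((0 : Int), (0 : Int))).1 + 1 ∧
                             (PySem.List.pyGetD ge i ((0 : Int), (0 : Int))).2 < e))
      (by
        intro i hi
        obtain ⟨h0, h1⟩ := PySem.List.mem_pyRange_one.mp hi
        rw [pyGetD_map_inrange ge _ i h0 h1 0 (0, 0), pyGetD_map_inrange ge _ i h0 h1 0 (0, 0)])]
  exact any_pyRange_getD ge (0, 0) (fun r => decide (s < r.1 + 1 ∧ r.2 < e))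

theorem contain_eq (ge : List (Int × Int)) (p : Int) :
    bContain
        (PySem.List.sorted ((ge.filter (fun r => decide (r.1 + 1 ≤ r.2))).map (fun r => r.1 + 1)) (fun x => x) false)
        (PySem.List.sorted ((ge.filter (fun r => decide (r.1 + 1 ≤ r.2))).map (fun r => r.2)) (fun x => x) false) p
      = ↑(ge.countP (fun r => decide (r.1 + 1 ≤ p ∧ p ≤ r.2))) := by
  unfold bContain
  rw [bisectRight_countP _ _ (PySem.List.sorted_pairwise _ _),
      bisectLeft_countP _ _ (PySem.List.sorted_pairwise _ _),
      countP_sortedMapFilter, countP_sortedMapFilter]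
  exact countP_diff_closed p ge

theorem interior_eq (ge : List (Int × Int)) (p : Int) :
    bInterior
        (PySem.List.sorted ((ge.filter (fun r => decide (r.1 + 2 ≤ r.2))).map (fun r => r.1 + 1)) (fun x => x) false)
        (PySem.List.sorted ((ge.filter (fun r => decide (r.1 + 2 ≤ r.2))).map (fun r => r.2)) (fun x => x) false) p
      = ge.any (fun r => decide (r.1 + 1 < p ∧ p < r.2)) := by
  unfold bInterior
  rw [bisectLeft_countP _ _ (PySem.List.sorted_pairwise _ _),
      bisectRight_countP _ _ (PySem.List.sorted_pairwise _ _),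
      countP_sortedMapFilter, countP_sortedMapFilter]
  have hd := countP_diff_open p ge
  rw [Bool.eq_iff_iff]
  simp only [decide_eq_true_eq, List.any_eq_true, gt_iff_lt]
  rw [show (↑(ge.countP (fun r => decide (r.1 + 1 < p) && decide (r.1 + 2 ≤ r.2))) : Int)
        - ↑(ge.countP (fun r => decide (r.2 ≤ p) && decide (r.1 + 2 ≤ r.2)))
        = ↑(ge.countP (fun r => decide (r.1 + 1 < p ∧ p < r.2))) from hd]
  rw [Int.natCast_pos, List.countP_pos_iff]
  simp



-- pure per-exon value of A's label loop (proof-side reformulation)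
def pairF (ge : List (Int × Int)) (sm em : Bool) (s e : Int) : String × String :=
  let a := if sm then "m" else locatePosA ge s
  let b := if em then "m" else locatePosA ge e
  let p1 : String × String :=
    if a = "intron" then
      (if b ≠ "intron" then ("outE", b)
       else if judgeIntronA ge s e then ("outE", "outE") else (a, b))
    else (a, b)
  (p1.1, if p1.2 = "intron" then (if p1.1 ≠ "intron" then "outE" else p1.2) else p1.2)

theorem foldl_pairCount (s e : Int) : ∀ (ge : List (Int × Int)) (acc : Int × Int),
    ge.foldl (fun acc r =>
      let a1 := if r.1 + 1 ≤ s ∧ s ≤ r.2 then (acc.1 + 1, acc.2) else acc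
      if r.1 + 1 ≤ e ∧ e ≤ r.2 then (a1.1, a1.2 + 1) else a1) acc
    = (acc.1 + ↑(ge.countP (fun r => decide (r.1 + 1 ≤ s ∧ s ≤ r.2))),
       acc.2 + ↑(ge.countP (fun r => decide (r.1 + 1 ≤ e ∧ e ≤ r.2)))) := by
  intro ge
  induction ge with
  | nil => intro acc; simp
  | cons r t ih =>
    intro acc
    simp only [List.foldl_cons, List.countP_cons]
    rw [ih]
    split_ifs <;>
      (try simp_all only [decide_eq_true_eq, and_self, not_true, not_false_iff]) <;>
      (rw [Prod.ext_iff]; constructor <;> (push_cast; omega))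

theorem foldl_countStepA (ge : List (Int × Int)) (es ee : List Int) (i : Int) (acc : Int × Int) :
    ((List.range ge.length).map (fun k : Nat => (k : Int))).foldl
      (countStepA (ge.map (fun i => i.1 + 1)) (ge.map (fun i => i.2)) es ee i) acc
    = (acc.1 + ↑(ge.countP (fun r => decide (r.1 + 1 ≤ PySem.List.pyGetD es i 0 ∧ PySem.List.pyGetD es i 0 ≤ r.2))),
       acc.2 + ↑(ge.countP (fun r => decide (r.1 + 1 ≤ PySem.List.pyGetD ee i 0 ∧ PySem.List.pyGetD ee i 0 ≤ r.2)))) := by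
  rw [← pyRange_cast]
  rw [PySem.List.foldl_congr_mem _ _
      (fun acc j => (fun (acc : Int × Int) (r : Int × Int) =>
        let a1 := if r.1 + 1 ≤ PySem.List.pyGetD es i 0 ∧ PySem.List.pyGetD es i 0 ≤ r.2 then (acc.1 + 1, acc.2) else acc
        if r.1 + 1 ≤ PySem.List.pyGetD ee i 0 ∧ PySem.List.pyGetD ee i 0 ≤ r.2 then (a1.1, a1.2 + 1) else a1)
        acc (PySem.List.pyGetD ge j ((0 : Int), (0 : Int)))) _
      (by
        intro acc j hj
        obtain ⟨h0, h1⟩ := PySem.List.mem_pyRange_one.mp hj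
        unfold countStepA
        rw [pyGetD_map_inrange ge _ j h0 h1 0 (0, 0), pyGetD_map_inrange ge _ j h0 h1 0 (0, 0)]
        try simp only [ge_iff_le]
        try rfl)]
  rw [PySem.List.foldl_pyRange_zero_pyGetD' ge ((0 : Int), (0 : Int))
      (fun (acc : Int × Int) (r : Int × Int) =>
        let a1 := if r.1 + 1 ≤ PySem.List.pyGetD es i 0 ∧ PySem.List.pyGetD es i 0 ≤ r.2 then (acc.1 + 1, acc.2) else acc
        if r.1 + 1 ≤ PySem.List.pyGetD ee i 0 ∧ PySem.List.pyGetD ee i 0 ≤ r.2 then (a1.1, a1.2 + 1) else a1) acc]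
  exact foldl_pairCount _ _ ge acc

theorem countsA (ge : List (Int × Int)) (es ee : List Int) (n : Nat) :
    ((List.range n).map (fun k : Nat => (k : Int))).foldl
        (fun (acc : Int × Int) i => ((List.range ge.length).map (fun k : Nat => (k : Int))).foldl
            (countStepA (ge.map (fun i => i.1 + 1)) (ge.map (fun i => i.2)) es ee i) acc)
        ((0 : Int), (0 : Int))
    = (((List.range n).map (fun k : Nat => (↑(ge.countP (fun r => decide (r.1 + 1 ≤ es.getD k 0 ∧ es.getD k 0 ≤ r.2))) : Int))).sum,
       (((List.range n).map (fun k : Nat => (↑(ge.countP (fun r => decide (r.1 + 1 ≤ ee.getD k 0 ∧ ee.getD k 0 ≤ r.2))) : Int))).sum)) := by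
  have hstep : (fun (acc : Int × Int) (i : Int) => ((List.range ge.length).map (fun k : Nat => (k : Int))).foldl
            (countStepA (ge.map (fun i => i.1 + 1)) (ge.map (fun i => i.2)) es ee i) acc)
        = (fun (acc : Int × Int) (i : Int) =>
            (acc.1 + ↑(ge.countP (fun r => decide (r.1 + 1 ≤ PySem.List.pyGetD es i 0 ∧ PySem.List.pyGetD es i 0 ≤ r.2))),
             acc.2 + ↑(ge.countP (fun r => decide (r.1 + 1 ≤ PySem.List.pyGetD ee i 0 ∧ PySem.List.pyGetD ee i 0 ≤ r.2))))) :=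
    funext fun acc => funext fun i => foldl_countStepA ge es ee i acc
  rw [hstep]
  rw [PySem.List.foldl_prod_mk
      (f := fun (a : Int) (i : Int) => a + ↑(ge.countP (fun r => decide (r.1 + 1 ≤ PySem.List.pyGetD es i 0 ∧ PySem.List.pyGetD es i 0 ≤ r.2))))
      (g := fun (a : Int) (i : Int) => a + ↑(ge.countP (fun r => decide (r.1 + 1 ≤ PySem.List.pyGetD ee i 0 ∧ PySem.List.pyGetD ee i 0 ≤ r.2))))]
  rw [PySem.List.foldl_add, PySem.List.foldl_add]
  simp only [List.map_map, Function.comp_def, PySem.List.pyGetD_natCast, zero_add]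

theorem posStepA_eq (ge : List (Int × Int)) (sm em : List Bool) (es ee : List Int)
    (k : Nat) (P Q : List String) :
    posStepA ge sm em es ee (P, Q) (k : Int)
      = (P ++ [(pairF ge (sm.getD k false) (em.getD k false) (es.getD k 0) (ee.getD k 0)).1],
         Q ++ [(pairF ge (sm.getD k false) (em.getD k false) (es.getD k 0) (ee.getD k 0)).2]) := by
  unfold posStepA pairF
  simp only [PySem.List.pyGetD_natCast, PySem.List.pyGetD_neg_one_append_singleton,
    pySetD_append_neg_one]
  generalize (if sm.getD k false = true then "m" else locatePosA ge (es.getD k 0)) = a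
  generalize (if em.getD k false = true then "m" else locatePosA ge (ee.getD k 0)) = b
  generalize judgeIntronA ge (es.getD k 0) (ee.getD k 0) = j
  split_ifs <;>
    simp_all [PySem.List.pyGetD_neg_one_append_singleton, pySetD_append_neg_one]

theorem foldl_posStepA (ge : List (Int × Int)) (sm em : List Bool) (es ee : List Int) :
    ∀ (n : Nat) (S E : List String),
      ((List.range n).map (fun k : Nat => (k : Int))).foldl (posStepA ge sm em es ee) (S, E)
        = (S ++ (List.range n).map (fun k =>
              (pairF ge (sm.getD k false) (em.getD k false) (es.getD k 0) (ee.getD k 0)).1),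
           E ++ (List.range n).map (fun k =>
              (pairF ge (sm.getD k false) (em.getD k false) (es.getD k 0) (ee.getD k 0)).2)) := by
  intro n
  induction n with
  | zero => intro S E; simp
  | succ m ih =>
    intro S E
    rw [List.range_succ, List.map_append, List.map_append, List.map_append,
        List.foldl_append, ih]
    simp only [List.map_cons, List.map_nil, List.foldl_cons, List.foldl_nil]
    rw [posStepA_eq]
    simp [List.append_assoc]

theorem getD_map_bool (xs : List Int) (f : Int → Bool) (k : Nat) (hk : k < xs.length) :
    (xs.map f).getD k false = f (xs.getD k 0) := by
  rw [List.getD_eq_getElem _ _ (by simpa using hk), List.getD_eq_getElem _ _ hk]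
  simp

theorem labelB_eq (ge : List (Int × Int)) (s e : Int) :
    labelB ge (PySem.Set.ofList (ge.map (fun r => r.1 + 1))) (PySem.Set.ofList (ge.map (fun r => r.2)))
      (PySem.List.sorted ((ge.filter (fun r => decide (r.1 + 2 ≤ r.2))).map (fun r => r.1 + 1)) (fun x => x) false)
      (PySem.List.sorted ((ge.filter (fun r => decide (r.1 + 2 ≤ r.2))).map (fun r => r.2)) (fun x => x) false)
      (s, e)
    = pairF ge (decide (s ∈ ge.map (fun r => r.1 + 1))) (decide (e ∈ ge.map (fun r => r.2))) s e := by
  unfold labelB pairF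
  simp only [contains_ofList_eq, interior_eq, locatePos_eq, judgeIntron_eq, gt_iff_lt]
  generalize (if decide (s ∈ ge.map (fun r => r.1 + 1)) = true then "m"
              else if (ge.any fun r => decide (r.1 + 1 < s ∧ s < r.2)) = true then "inE" else "intron") = a
  generalize (if decide (e ∈ ge.map (fun r => r.2)) = true then "m"
              else if (ge.any fun r => decide (r.1 + 1 < e ∧ e < r.2)) = true then "inE" else "intron") = b
  generalize (ge.any fun r => decide (s < r.1 + 1 ∧ r.2 < e)) = j
  split_ifs <;> simp_all

theorem compareExon2gene_main : ∀ (ge : List (Int × Int)) (es ee : List Int), es.length ≤ ee.length →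
    compareExon2gene ge es ee = compareExon2gene_alt ge es ee := by
  intro ge es ee hP
  simp only [compareExon2gene, compareExon2gene_alt, PySem.List.len_eq, List.length_map,
    pyRange_cast]
  rw [countsA ge es ee es.length]
  rw [foldl_posStepA ge (es.map (fun i => decide (i ∈ ge.map (fun i => i.1 + 1))))
        (ee.map (fun i => decide (i ∈ ge.map (fun i => i.2)))) es ee es.length [] []]
  rw [zip_map_getD (labelB ge (PySem.Set.ofList (ge.map (fun r => r.1 + 1)))
        (PySem.Set.ofList (ge.map (fun r => r.2)))
        (PySem.List.sorted ((ge.filter (fun r => decide (r.1 + 2 ≤ r.2))).map (fun r => r.1 + 1)) (fun x => x) false)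
        (PySem.List.sorted ((ge.filter (fun r => decide (r.1 + 2 ≤ r.2))).map (fun r => r.2)) (fun x => x) false))
      es ee hP]
  rw [zip_map_getD (fun q =>
        bContain
          (PySem.List.sorted ((ge.filter (fun r => decide (r.1 + 1 ≤ r.2))).map (fun r => r.1 + 1)) (fun x => x) false)
          (PySem.List.sorted ((ge.filter (fun r => decide (r.1 + 1 ≤ r.2))).map (fun r => r.2)) (fun x => x) false) q.1
        + bContain
          (PySem.List.sorted ((ge.filter (fun r => decide (r.1 + 1 ≤ r.2))).map (fun r => r.1 + 1)) (fun x => x) false)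
          (PySem.List.sorted ((ge.filter (fun r => decide (r.1 + 1 ≤ r.2))).map (fun r => r.2)) (fun x => x) false) q.2)
      es ee hP]
  simp only [Prod.mk.injEq, List.nil_append, List.map_map]
  refine ⟨?_, ?_, ?_, ?_⟩
  · refine congrArg _ ?_
    apply List.map_congr_left
    intro k hk
    rw [List.mem_range] at hk
    simp only [Function.comp_def]
    rw [getD_map_bool es _ k hk, getD_map_bool ee _ k (lt_of_lt_of_le hk hP), labelB_eq]
  · refine congrArg _ ?_
    apply List.map_congr_left
    intro k hk
    rw [List.mem_range] at hk
    simp only [Function.comp_def]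
    rw [getD_map_bool es _ k hk, getD_map_bool ee _ k (lt_of_lt_of_le hk hP), labelB_eq]
  · simp only [Function.comp_def, contains_ofList_eq]
  · simp only [contain_eq, PySem.List.sum_map_add_int]



-- ===== VERDICT (by name: the statement is the Claim_ definition above) =====
theorem compareExon2gene_spec : Claim_equal_compareExon2gene := by
  intro ge es ee _hD hP
  unfold Spec_compareExon2gene
  exact compareExon2gene_main ge es ee hP
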